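-- pv_equiv track=rewrite | github.com/bettercallshao/hppuml | hppuml.py | _derive_brackets
-- ===== SOURCE A (Python) =====
-- def _derive_brackets(data):
--     ''' find a list of {} in stream '''
--     l = []
--     for i, c in enumerate(data):
--         if c == '{':
--             l.append((i, 1))
--         elif c == '}':
--             l.append((i, -1))
--
--     return l
-- ===== SOURCE B (Python) =====
-- def _derive_brackets(data):
--     ''' find a list of {} in stream '''
--     opens = [(i, 1) for i, c in enumerate(data) if c == '{']
--     closes = [(i, -1) for i, c in enumerate(data) if c == '}']
--     # two-pointer merge of the two index-sorted lists
--     out = []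
--     a = b = 0
--     while a < len(opens) and b < len(closes):
--         if opens[a][0] <= closes[b][0]:
--             out.append(opens[a])
--             a += 1
--         else:
--             out.append(closes[b])
--             b += 1
--     out.extend(opens[a:])
--     out.extend(closes[b:])
--     return out
-- ===== Notes on version B (the rewrite author's own statement) =====
-- stated objective: alternative
-- what changed: Replaces the single interleaved scan with two filtered passes (one collecting '{' positions, one '}' positions) combined by an explicit two-pointer merge on indices.
import Mathlib
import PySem

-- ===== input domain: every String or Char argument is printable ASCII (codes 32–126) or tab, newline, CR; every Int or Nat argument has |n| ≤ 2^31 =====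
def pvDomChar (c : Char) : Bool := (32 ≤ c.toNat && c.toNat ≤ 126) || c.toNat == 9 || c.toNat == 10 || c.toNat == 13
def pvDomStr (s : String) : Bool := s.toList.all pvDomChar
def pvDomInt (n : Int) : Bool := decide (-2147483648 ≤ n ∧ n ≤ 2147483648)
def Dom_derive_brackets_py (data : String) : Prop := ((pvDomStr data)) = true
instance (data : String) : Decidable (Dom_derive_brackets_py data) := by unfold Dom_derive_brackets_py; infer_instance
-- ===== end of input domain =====

-- B replaces A's single interleaved scan by two filtered passes ('{' and '}' positions)
-- combined with an explicit two-pointer merge on indices; same cost, different decomposition.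

-- ===== PORT A =====
def derive_brackets_py (data : String) : List (Int × Int) :=
  (PySem.List.enumerate data.toList).foldl
    (fun l ic =>
      if ic.2 = '{' then l ++ [(ic.1, 1)]
      else if ic.2 = '}' then l ++ [(ic.1, -1)]
      else l) []

-- ===== PORT B =====
-- opens = [(i, 1) for i, c in enumerate(data) if c == '{']
def brOpens (data : String) : List (Int × Int) :=
  ((PySem.List.enumerate data.toList).filter (fun ic => ic.2 == '{')).map (fun ic => (ic.1, 1))

-- closes = [(i, -1) for i, c in enumerate(data) if c == '}']
def brCloses (data : String) : List (Int × Int) :=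
  ((PySem.List.enumerate data.toList).filter (fun ic => ic.2 == '}')).map (fun ic => (ic.1, -1))

-- the two-pointer merge loop (while both nonempty, take the smaller index; then the leftovers)
def brMerge : List (Int × Int) → List (Int × Int) → List (Int × Int)
  | [], ys => ys
  | x :: xs, [] => x :: xs
  | x :: xs, y :: ys =>
      if x.1 ≤ y.1 then x :: brMerge xs (y :: ys) else y :: brMerge (x :: xs) ys

def derive_brackets_py_alt (data : String) : List (Int × Int) :=
  brMerge (brOpens data) (brCloses data)

-- ===== PRECONDITION & SPEC =====
def Spec_derive_brackets_py (data : String) (out : List (Int × Int)) : Prop := out = derive_brackets_py_alt data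
instance (data : String) (out : List (Int × Int)) : Decidable (Spec_derive_brackets_py data out) := by unfold Spec_derive_brackets_py; infer_instance

-- ===== CLAIM (what is proved, stated in full; the proofs are below) =====
def Claim_equal_derive_brackets_py : Prop := ∀ (data : String), Dom_derive_brackets_py data → Spec_derive_brackets_py data (derive_brackets_py data)

-- ===== LEMMAS AND PROOFS =====

-- canonical form of A's scan, recursive on the char list
def brScan (s : Int) : List Char → List (Int × Int)
  | [] => []
  | c :: cs =>
      (if c = '{' then [(s, 1)] else if c = '}' then [(s, -1)] else []) ++ brScan (s + 1) cs

theorem foldl_eq_brScan (cs : List Char) (s : Int) (acc : List (Int × Int)) :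
    (PySem.List.enumerate cs s).foldl
      (fun l ic =>
        if ic.2 = '{' then l ++ [(ic.1, 1)]
        else if ic.2 = '}' then l ++ [(ic.1, -1)]
        else l) acc = acc ++ brScan s cs := by
  induction cs generalizing s acc with
  | nil => simp [PySem.List.enumerate_nil, brScan]
  | cons c cs ih =>
      simp only [PySem.List.enumerate_cons, List.foldl_cons, brScan, ih]
      split_ifs <;> try simp [List.append_assoc]

theorem brMerge_nil_right (xs : List (Int × Int)) : brMerge xs [] = xs := by
  cases xs <;> simp [brMerge]

theorem fst_ge_of_mem_enum (cs : List Char) (s : Int) (p : Int × Char)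
    (h : p ∈ PySem.List.enumerate cs s) : s ≤ p.1 := by
  rw [PySem.List.mem_enumerate_iff] at h
  obtain ⟨k, hk, rfl⟩ := h
  simp

theorem brScan_eq_merge (cs : List Char) (s : Int) :
    brScan s cs =
      brMerge (((PySem.List.enumerate cs s).filter (fun ic => ic.2 == '{')).map (fun ic => (ic.1, 1)))
              (((PySem.List.enumerate cs s).filter (fun ic => ic.2 == '}')).map (fun ic => (ic.1, -1))) := by
  induction cs generalizing s with
  | nil => simp [PySem.List.enumerate_nil, brScan, brMerge]
  | cons c cs ih =>
      have hop : ∀ p ∈ ((PySem.List.enumerate cs (s+1)).filter (fun ic => ic.2 == '{')).map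
          (fun ic => ((ic.1 : Int), (1 : Int))), s + 1 ≤ p.1 := by
        intro p hp
        simp only [List.mem_map, List.mem_filter] at hp
        obtain ⟨q, ⟨hq, _⟩, rfl⟩ := hp
        exact fst_ge_of_mem_enum _ _ _ hq
      have hcl : ∀ p ∈ ((PySem.List.enumerate cs (s+1)).filter (fun ic => ic.2 == '}')).map
          (fun ic => ((ic.1 : Int), (-1 : Int))), s + 1 ≤ p.1 := by
        intro p hp
        simp only [List.mem_map, List.mem_filter] at hp
        obtain ⟨q, ⟨hq, _⟩, rfl⟩ := hp
        exact fst_ge_of_mem_enum _ _ _ hq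
      by_cases h1 : c = '{'
      · subst h1
        simp only [PySem.List.enumerate_cons, List.filter_cons, brScan]
        simp [ih]
        cases hcls : ((PySem.List.enumerate cs (s+1)).filter (fun ic => ic.2 == '}')).map
            (fun ic => ((ic.1 : Int), (-1 : Int))) with
        | nil => simp [brMerge_nil_right]
        | cons y ys =>
            have hy : s + 1 ≤ y.1 := hcl y (by rw [hcls]; exact List.mem_cons_self ..)
            simp only [brMerge, if_pos (by omega : (s : Int) ≤ y.1)]
      · by_cases h2 : c = '}'
        · subst h2
          simp only [PySem.List.enumerate_cons, List.filter_cons, brScan]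
          simp [ih]
          cases hops : ((PySem.List.enumerate cs (s+1)).filter (fun ic => ic.2 == '{')).map
              (fun ic => ((ic.1 : Int), (1 : Int))) with
          | nil => simp [brMerge]
          | cons x xs =>
              have hx : s + 1 ≤ x.1 := hop x (by rw [hops]; exact List.mem_cons_self ..)
              simp only [brMerge, if_neg (by omega : ¬ (x.1 ≤ (s : Int)))]
        · have e1 : (c == '{') = false := by simpa using h1
          have e2 : (c == '}') = false := by simpa using h2
          simp only [PySem.List.enumerate_cons, List.filter_cons, brScan, e1, e2]
          simp [h1, h2, ih]

-- ===== VERDICT (by name: the statement is the Claim_ definition above) =====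
theorem derive_brackets_py_spec : Claim_equal_derive_brackets_py := by
  intro data _
  unfold Spec_derive_brackets_py derive_brackets_py derive_brackets_py_alt brOpens brCloses
  rw [foldl_eq_brScan, List.nil_append, brScan_eq_merge]
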